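-- pv_equiv track=rewrite | github.com/rf-iasys/OEIS | OEIS_A000295.py | A000295
-- ===== SOURCE A (Python) =====
-- def A000295(n):
--     marked = []
--     current = 1
--     k = 1
--
--     while len(marked) < n:
--         marked.append(k)
--         k += k + current + 1
--         current += 1
--
--     return marked
-- ===== SOURCE B (Python) =====
-- def A000295(n):
--     return [(1 << (i + 2)) - i - 3 for i in range(n)]
-- ===== Notes on version B (the rewrite author's own statement) =====
-- stated objective: simpler
-- what changed: Replaced the stateful while-loop recurrence (mutable k and current accumulators) with a direct closed-form comprehension, each term computed from its index alone as a shifted power of two minus a linear term.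
import Mathlib
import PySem

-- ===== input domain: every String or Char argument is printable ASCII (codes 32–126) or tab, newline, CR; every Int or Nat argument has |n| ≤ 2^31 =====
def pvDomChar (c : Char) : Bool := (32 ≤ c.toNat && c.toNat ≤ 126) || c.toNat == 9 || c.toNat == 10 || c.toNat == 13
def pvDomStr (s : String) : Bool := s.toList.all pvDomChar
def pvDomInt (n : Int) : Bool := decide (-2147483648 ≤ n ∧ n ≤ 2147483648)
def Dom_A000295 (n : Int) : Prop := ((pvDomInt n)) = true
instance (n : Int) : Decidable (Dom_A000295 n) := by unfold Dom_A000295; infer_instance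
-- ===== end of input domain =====

-- B replaces A's stateful while-loop recurrence with the closed form 2^(i+2)-(i+2)-1 per index (simpler).

-- ===== PORT A =====
-- A's while-loop runs while len(marked) < n; length grows by one per iteration,
-- so it performs exactly n.toNat iterations: ported as fuel recursion on that count.
def A000295_loop : Nat → List Int → Int → Int → List Int
  | 0, marked, _, _ => marked
  | m + 1, marked, current, k => A000295_loop m (marked ++ [k]) (current + 1) (k + k + current + 1)

def A000295 (n : Int) : List Int := A000295_loop n.toNat [] 1 1

-- ===== PORT B =====
def A000295_alt (n : Int) : List Int :=
  (PySem.List.pyRange 0 n 1).map (fun i => ((1 : Int) <<< (i + 2).toNat) - i - 3)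

-- ===== PRECONDITION & SPEC =====
def Spec_A000295 (n : Int) (out : List Int) : Prop := out = A000295_alt n
instance (n : Int) (out : List Int) : Decidable (Spec_A000295 n out) := by unfold Spec_A000295; infer_instance

-- ===== CLAIM (what is proved, stated in full; the proofs are below) =====
def Claim_equal_A000295 : Prop := ∀ (n : Int), Dom_A000295 n → Spec_A000295 n (A000295 n)

-- ===== LEMMAS AND PROOFS =====

-- Loop invariant: starting from current = c+1 and k = 2^(c+2)-(c+2)-1, each emitted
-- term has the closed form 2^(c+i+2)-(c+i+2)-1.
theorem A000295_loop_closed (m : Nat) : ∀ (c : Nat) (marked : List Int),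
    A000295_loop m marked ((c : Int) + 1) ((2 : Int) ^ (c + 2) - (c + 2) - 1)
      = marked ++ (List.range m).map (fun i => (2 : Int) ^ (c + i + 2) - ((c : Int) + i + 2) - 1) := by
  induction m with
  | zero => intro c marked; simp [A000295_loop]
  | succ m ih =>
    intro c marked
    have hk : ((2 : Int) ^ (c + 2) - (c + 2) - 1) + ((2 : Int) ^ (c + 2) - (c + 2) - 1)
        + ((c : Int) + 1) + 1 = (2 : Int) ^ (c + 1 + 2) - ((c : Int) + 1 + 2) - 1 := by
      have : (2 : Int) ^ (c + 1 + 2) = 2 * 2 ^ (c + 2) := by ring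
      rw [this]; ring
    have hc : ((c : Int) + 1) + 1 = ((c + 1 : Nat) : Int) + 1 := by push_cast; ring
    rw [A000295_loop, hk, hc]
    have := ih (c + 1) (marked ++ [(2 : Int) ^ (c + 2) - (c + 2) - 1])
    rw [show ((c + 1 : Nat) + 2) = (c + 1 + 2) from rfl] at this
    rw [show (((c + 1 : Nat) : Int) + 2) = ((c : Int) + 1 + 2) by push_cast; ring] at this
    rw [this]
    rw [List.range_succ_eq_map]
    simp [List.append_assoc, List.map_map, Function.comp]
    intro a _
    rw [show c + 1 + a + 2 = c + (a + 1) + 2 by omega]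
    ring

-- ===== VERDICT (by name: the statement is the Claim_ definition above) =====
theorem A000295_spec : Claim_equal_A000295 := by
  intro n _
  unfold Spec_A000295 A000295 A000295_alt
  have h := A000295_loop_closed n.toNat 0 []
  simp only [Nat.cast_zero, zero_add, List.nil_append] at h
  norm_num at h
  rw [h, PySem.List.pyRange_one]
  simp only [Int.sub_zero, List.map_map]
  apply List.map_congr_left
  intro k hk
  simp only [Function.comp]
  have h2 : ((0 : Int) + k + 2).toNat = k + 2 := by omega
  rw [h2, Int.shiftLeft_natCast_right, Int.shiftLeft_eq]
  ring
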